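-- pv_equiv track=rewrite | github.com/picasso653/codesignal_-codes | Interview Prep/double_digits.py | solution
-- ===== SOURCE A (Python) =====
-- def solution(n):
--     res = 0
--     while n > 0:
--         dd = n % 100
--         if dd % 11 == 0:
--             res += 1
--         n //= 10
--     return res
--     pass
-- ===== SOURCE B (Python) =====
-- def solution(n):
--     if n <= 0:
--         return 0
--     ds = []
--     while n:
--         ds.append(n % 10)
--         n //= 10
--     return sum(1 for a, b in zip(ds, ds[1:]) if a == b)
-- ===== Notes on version B (the rewrite author's own statement) =====
-- stated objective: alternative
-- what changed: Instead of testing n % 100 % 11 == 0 while peeling, B builds the digit list once and counts adjacent equal digits, using that a two-digit chunk 10a+b is divisible by 11 iff a == b.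
import Mathlib
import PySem

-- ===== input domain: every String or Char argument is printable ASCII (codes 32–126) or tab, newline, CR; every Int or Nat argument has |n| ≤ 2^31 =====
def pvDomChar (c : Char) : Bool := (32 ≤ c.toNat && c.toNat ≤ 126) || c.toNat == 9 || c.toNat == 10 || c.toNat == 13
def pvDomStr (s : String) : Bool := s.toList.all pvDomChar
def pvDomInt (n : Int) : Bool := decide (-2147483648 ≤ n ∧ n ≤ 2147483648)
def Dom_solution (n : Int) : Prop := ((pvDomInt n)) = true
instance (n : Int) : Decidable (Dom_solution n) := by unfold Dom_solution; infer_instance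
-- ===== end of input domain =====

-- B replaces A's per-step (n % 100) % 11 == 0 test by building the digit list once and
-- counting adjacent equal digits (10a+b ≡ 0 mod 11 ↔ a = b for digits); same cost, different algorithm.

-- ===== PORT A =====
-- the while-loop of A, peeling with n % 100 and n //= 10
def solutionGo (n : Int) (res : Int) : Int :=
  if h : n > 0 then
    let dd := PySem.Int.mod n 100
    solutionGo (PySem.Int.floordiv n 10) (if PySem.Int.mod dd 11 = 0 then res + 1 else res)
  else res
termination_by n.toNat
decreasing_by
  have h10 : PySem.Int.floordiv n 10 = n / 10 := PySem.Int.floordiv_eq_ediv_of_pos (by omega)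
  rw [h10]; omega

def solution (n : Int) : Int := solutionGo n 0

-- ===== PORT B =====
-- the digit-collecting while-loop of B (ds.append(n % 10); n //= 10)
def digitsOf (n : Int) : List Int :=
  if h : n > 0 then
    PySem.Int.mod n 10 :: digitsOf (PySem.Int.floordiv n 10)
  else []
termination_by n.toNat
decreasing_by
  have h10 : PySem.Int.floordiv n 10 = n / 10 := PySem.Int.floordiv_eq_ediv_of_pos (by omega)
  rw [h10]; omega

-- sum(1 for a, b in zip(ds, ds[1:]) if a == b)
def countAdjEq : List Int → Int
  | a :: b :: t => (if a = b then 1 else 0) + countAdjEq (b :: t)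
  | _ => 0

def solution_alt (n : Int) : Int :=
  if n ≤ 0 then 0 else countAdjEq (digitsOf n)

-- ===== PRECONDITION & SPEC =====
def Spec_solution (n : Int) (out : Int) : Prop := out = solution_alt n
instance (n : Int) (out : Int) : Decidable (Spec_solution n out) := by unfold Spec_solution; infer_instance

-- ===== CLAIM (what is proved, stated in full; the proofs are below) =====
def Claim_equal_solution : Prop := ∀ (n : Int), Dom_solution n → Spec_solution n (solution n)

-- ===== LEMMAS AND PROOFS =====

theorem digitsOf_pos (n : Int) (h : 0 < n) :
    digitsOf n = n % 10 :: digitsOf (n / 10) := by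
  rw [digitsOf]
  simp [h, PySem.Int.mod_eq_emod_of_pos (show (0:Int) < 10 by norm_num)]

theorem digitsOf_nonpos (n : Int) (h : ¬ n > 0) : digitsOf n = [] := by
  rw [digitsOf]; simp [h]

-- A's per-step test equals the adjacent-digit equality (for n > 0)
theorem chunk_iff (n : Int) (h : 0 < n) :
    (PySem.Int.mod (PySem.Int.mod n 100) 11 = 0) ↔ (n % 10 = (n / 10) % 10) := by
  rw [PySem.Int.mod_eq_emod_of_pos (show (0:Int) < 100 by norm_num),
      PySem.Int.mod_eq_emod_of_pos (show (0:Int) < 11 by norm_num)]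
  have h1 : n % 100 = 10 * ((n / 10) % 10) + n % 10 := by omega
  omega

-- one unfolding of A's loop (for n > 0), with // and % in Euclidean form
theorem solutionGo_pos (n res : Int) (h : 0 < n) :
    solutionGo n res
      = solutionGo (n / 10) (if PySem.Int.mod (PySem.Int.mod n 100) 11 = 0 then res + 1 else res) := by
  rw [solutionGo]
  simp only [h, dif_pos, PySem.Int.floordiv_eq_ediv_of_pos (show (0:Int) < 10 by norm_num)]

theorem solutionGo_nonpos (n res : Int) (h : ¬ n > 0) : solutionGo n res = res := by
  rw [solutionGo]; simp [h]

-- loop invariant: solutionGo n res = res + countAdjEq (digitsOf n)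
theorem solutionGo_eq_aux :
    ∀ (k : Nat) (n res : Int), n.toNat ≤ k → solutionGo n res = res + countAdjEq (digitsOf n) := by
  intro k
  induction k with
  | zero =>
    intro n res hk
    have h : ¬ n > 0 := by omega
    rw [solutionGo_nonpos n res h, digitsOf_nonpos n h]
    simp [countAdjEq]
  | succ k ih =>
    intro n res hk
    by_cases h : 0 < n
    · rw [solutionGo_pos n res h]
      have hlt : (n / 10).toNat ≤ k := by omega
      rw [ih _ _ hlt, digitsOf_pos n h]
      by_cases hq : 0 < n / 10
      · rw [digitsOf_pos _ hq, countAdjEq, ← digitsOf_pos _ hq]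
        have hiff := chunk_iff n h
        by_cases he : n % 10 = (n / 10) % 10
        · rw [if_pos (hiff.mpr he), if_pos he]; ring
        · rw [if_neg (fun hc => he (hiff.mp hc)), if_neg he]; ring
      · rw [digitsOf_nonpos _ hq]
        have hne : ¬ PySem.Int.mod (PySem.Int.mod n 100) 11 = 0 := by
          rw [chunk_iff n h]
          have h0 : n / 10 = 0 := by omega
          omega
        rw [if_neg hne]
        simp [countAdjEq]
    · rw [solutionGo_nonpos n res h, digitsOf_nonpos n h]
      simp [countAdjEq]

theorem solutionGo_eq (n res : Int) : solutionGo n res = res + countAdjEq (digitsOf n) :=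
  solutionGo_eq_aux n.toNat n res (le_refl _)

-- ===== VERDICT (by name: the statement is the Claim_ definition above) =====
theorem solution_spec : Claim_equal_solution := by
  intro n _
  unfold Spec_solution solution solution_alt
  rw [solutionGo_eq]
  by_cases h : n ≤ 0
  · rw [digitsOf_nonpos n (by omega)]
    simp [h, countAdjEq]
  · simp [h]
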